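-- pv_equiv track=rewrite | github.com/shahviraj222/DSA2 | 06BS/13BookAllocation.py | allocationBook
-- ===== SOURCE A (Python) =====
-- def findStudent(arr,pages):
--     student = 1
--     studentpages = 0
--     for i in range(len(arr)):
--         if studentpages+arr[i]<= pages:
--             studentpages+=arr[i]
--         else:
--             student+=1
--             studentpages = arr[i]
--     return student
--
-- def allocationBook(arr,student):
--     if len(arr)<student:
--         return -1
--     low = max(arr)
--     high = sum(num for num in arr)
--     for pages in range(low,high):
--         countStudent = findStudent(arr,pages)
--         if countStudent==student:
--             return pages
-- ===== SOURCE B (Python) =====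
-- # B: instead of trying every page count in [max, sum) one by one, jump from each
-- # tried cap straight to the next breakpoint (the smallest compared segment sum
-- # above the cap -- the greedy count is constant in between), skipping whole plateaus.
-- def countNext(arr, cap):
--     groups = 1
--     total = 0
--     nxt = None
--     for x in arr:
--         total += x
--         if total > cap:
--             if nxt is None or total < nxt:
--                 nxt = total
--             groups += 1
--             total = x
--     return groups, nxt
--
-- def allocationBook(arr, student):
--     if len(arr) < student:
--         return -1
--     low = max(arr)
--     high = sum(arr)
--     pages = low
--     while pages < high:
--         groups, nxt = countNext(arr, pages)
--         if groups == student: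
--             return pages
--         if nxt is None:
--             return None
--         pages = nxt
--     return None
-- ===== Notes on version B (the rewrite author's own statement) =====
-- stated objective: alternative
-- what changed: Instead of testing every integer page count in [max(arr), sum(arr)) one by one, B jumps from each tried cap directly to the next breakpoint (the smallest running segment sum above the cap, computed during the same counting pass), trying only the caps at which the greedy student count can change.
import Mathlib
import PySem

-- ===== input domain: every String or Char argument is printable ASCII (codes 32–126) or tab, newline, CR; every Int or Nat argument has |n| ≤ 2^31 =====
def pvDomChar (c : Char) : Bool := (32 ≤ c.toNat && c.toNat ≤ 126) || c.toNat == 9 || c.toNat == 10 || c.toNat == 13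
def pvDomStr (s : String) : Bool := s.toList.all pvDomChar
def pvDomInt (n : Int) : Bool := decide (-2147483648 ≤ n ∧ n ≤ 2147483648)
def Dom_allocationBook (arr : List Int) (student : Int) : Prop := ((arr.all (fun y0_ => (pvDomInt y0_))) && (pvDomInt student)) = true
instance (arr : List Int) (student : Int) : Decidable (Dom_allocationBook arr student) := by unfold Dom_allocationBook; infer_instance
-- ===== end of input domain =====

-- B replaces A's page-by-page scan of [max, sum) by jumps to the next breakpoint
-- (the smallest compared segment sum above the current cap); the count is constant in between.

-- ===== PORT A =====
-- findStudent(arr, pages): greedy count of students, loop transcribed as structural recursion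
def findStudentA : List Int → Int → Int → Int → Int
  | [], _, student, _ => student
  | a :: t, pages, student, studentpages =>
    if studentpages + a ≤ pages then findStudentA t pages student (studentpages + a)
    else findStudentA t pages (student + 1) a

-- 'for pages in range(low, high): if findStudent(arr, pages) == student: return pages'
def allocLoopA (arr : List Int) (student : Int) (pages high : Int) : Option Int :=
  if h : pages < high then
    if findStudentA arr pages 1 0 = student then some pages
    else allocLoopA arr student (pages + 1) high
  else none
termination_by (high - pages).toNat
decreasing_by omega

def allocationBook (arr : List Int) (student : Int) : Option Int :=
  if (arr.length : Int) < student then some (-1)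
  else
    match PySem.List.max? arr (fun x => x) with
    | none => none   -- max([]) raises ValueError in Python: excluded by Pre_
    | some low => allocLoopA arr student low arr.sum

-- ===== PORT B =====
-- 'if nxt is None or total < nxt: nxt = total'
def minUpd (nxt : Option Int) (tot : Int) : Option Int :=
  match nxt with
  | none => some tot
  | some m => if tot < m then some tot else some m

-- countNext(arr, cap): greedy group count plus the smallest overflowing running sum above cap
def countNextB : List Int → Int → Int → Int → Option Int → Int × Option Int
  | [], _, groups, _, nxt => (groups, nxt)
  | x :: t, cap, groups, total, nxt =>
    let tot := total + x
    if tot > cap then countNextB t cap (groups + 1) x (minUpd nxt tot)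
    else countNextB t cap groups tot nxt

-- characterization of the accumulator update (used by the termination argument below)
lemma minUpd_spec (nxt : Option Int) (tot : Int) :
    ∃ v, minUpd nxt tot = some v ∧ v ≤ tot ∧ (∀ j, nxt = some j → v ≤ j) ∧
      (v = tot ∨ nxt = some v) := by
  cases nxt with
  | none =>
    refine ⟨tot, rfl, le_rfl, ?_, Or.inl rfl⟩
    intro j hj; cases hj
  | some m =>
    simp only [minUpd]
    by_cases h : tot < m
    · refine ⟨tot, by rw [if_pos h], le_rfl, ?_, Or.inl rfl⟩
      intro j hj; cases hj; omega
    · refine ⟨m, by rw [if_neg h], by omega, ?_, Or.inr rfl⟩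
      intro j hj; cases hj; exact le_rfl

-- the jump target is strictly above the current cap (needed for the while-loop's termination)
lemma countNextB_gt : ∀ (l : List Int) (cap g tot : Int) (nxt : Option Int),
    (∀ k, nxt = some k → cap < k) →
    ∀ m, (countNextB l cap g tot nxt).2 = some m → cap < m := by
  intro l
  induction l with
  | nil =>
    intro cap g tot nxt hinv m hm
    exact hinv m hm
  | cons x t ih =>
    intro cap g tot nxt hinv m hm
    simp only [countNextB] at hm
    split_ifs at hm with htot
    · refine ih cap (g + 1) x _ ?_ m hm
      intro k hk
      obtain ⟨v, hv1, hv2, hv3, hv4⟩ := minUpd_spec nxt (tot + x)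
      rw [hv1] at hk
      cases hk
      rcases hv4 with rfl | hv4
      · omega
      · exact hinv k hv4
    · exact ih cap g (tot + x) nxt hinv m hm

-- 'pages = low; while pages < high: ... pages = nxt'
def allocLoopB (arr : List Int) (student : Int) (pages high : Int) : Option Int :=
  if h : pages < high then
    let r := countNextB arr pages 1 0 none
    if r.1 = student then some pages
    else
      match hm : r.2 with
      | none => none
      | some m => allocLoopB arr student m high
  else none
termination_by (high - pages).toNat
decreasing_by
  have := countNextB_gt arr pages 1 0 none (by intro k hk; cases hk) m hm
  omega

def allocationBook_alt (arr : List Int) (student : Int) : Option Int :=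
  if (arr.length : Int) < student then some (-1)
  else
    match PySem.List.max? arr (fun x => x) with
    | none => none   -- max([]) raises ValueError in Python: excluded by Pre_
    | some low => allocLoopB arr student low arr.sum

-- ===== PRECONDITION & SPEC =====
-- Pre_ excludes only the inputs where Python A raises: arr = [] with student ≤ 0 reaches max([]) (ValueError).
def Pre_allocationBook (arr : List Int) (student : Int) : Prop := arr = [] → 1 ≤ student
instance (arr : List Int) (student : Int) : Decidable (Pre_allocationBook arr student) := by
  unfold Pre_allocationBook; infer_instance

def pvWitness_allocationBook : List Int × Int := ([12, 34, 67, 90], 2)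

def Spec_allocationBook (arr : List Int) (student : Int) (out : Option Int) : Prop := out = allocationBook_alt arr student
instance (arr : List Int) (student : Int) (out : Option Int) : Decidable (Spec_allocationBook arr student out) := by unfold Spec_allocationBook; infer_instance

-- ===== CLAIM (what is proved, stated in full; the proofs are below) =====
def Claim_equal_allocationBook : Prop := ∀ (arr : List Int) (student : Int), Dom_allocationBook arr student → Pre_allocationBook arr student → Spec_allocationBook arr student (allocationBook arr student)

-- ===== LEMMAS AND PROOFS =====

-- the running sums compared against 'cap' during the greedy pass
def cmps (cap : Int) : List Int → Int → List Int
  | [], _ => []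
  | x :: t, sp => (sp + x) :: (if sp + x ≤ cap then cmps cap t (sp + x) else cmps cap t x)

-- B's counter computes exactly A's greedy count
lemma countNextB_fst : ∀ (l : List Int) (cap g tot : Int) (nxt : Option Int),
    (countNextB l cap g tot nxt).1 = findStudentA l cap g tot := by
  intro l
  induction l with
  | nil => intro cap g tot nxt; rfl
  | cons x t ih =>
    intro cap g tot nxt
    simp only [countNextB, findStudentA]
    by_cases h : tot + x ≤ cap
    · rw [if_neg (by omega), if_pos h]; exact ih _ _ _ _
    · rw [if_pos (by omega), if_neg h]; exact ih _ _ _ _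

-- once the accumulator is set it never returns to none
lemma countNextB_ne_none : ∀ (l : List Int) (cap g tot k : Int),
    (countNextB l cap g tot (some k)).2 ≠ none := by
  intro l
  induction l with
  | nil => intro cap g tot k h; simp [countNextB] at h
  | cons x t ih =>
    intro cap g tot k h
    simp only [countNextB] at h
    split_ifs at h with htot
    · obtain ⟨v, hv1, _⟩ := minUpd_spec (some k) (tot + x)
      rw [hv1] at h
      exact ih _ _ _ _ h
    · exact ih _ _ _ _ h

-- nxt = none means no compared sum exceeds cap
lemma countNextB_none : ∀ (l : List Int) (cap g tot : Int) (nxt : Option Int),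
    (countNextB l cap g tot nxt).2 = none →
    ∀ s ∈ cmps cap l tot, s ≤ cap := by
  intro l
  induction l with
  | nil => intro cap g tot nxt _ s hs; cases hs
  | cons x t ih =>
    intro cap g tot nxt h s hs
    simp only [countNextB] at h
    simp only [cmps, List.mem_cons] at hs
    by_cases htot : tot + x > cap
    · exfalso
      rw [if_pos htot] at h
      obtain ⟨v, hv1, _⟩ := minUpd_spec nxt (tot + x)
      rw [hv1] at h
      exact countNextB_ne_none t cap (g + 1) x v h
    · rw [if_neg htot] at h
      rcases hs with rfl | hs
      · omega
      · rw [if_pos (by omega)] at hs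
        exact ih cap g (tot + x) nxt h s hs

-- nxt = some m: m is a compared sum above cap (or the incoming accumulator), minimal among them
lemma countNextB_some : ∀ (l : List Int) (cap g tot : Int) (nxt : Option Int) (m : Int),
    (countNextB l cap g tot nxt).2 = some m →
    (nxt = some m ∨ (m ∈ cmps cap l tot ∧ cap < m)) ∧
    (∀ s ∈ cmps cap l tot, cap < s → m ≤ s) ∧
    (∀ k, nxt = some k → m ≤ k) := by
  intro l
  induction l with
  | nil =>
    intro cap g tot nxt m h
    simp only [countNextB] at h
    refine ⟨Or.inl h, ?_, ?_⟩
    · intro s hs; cases hs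
    · intro k hk; rw [h] at hk; cases hk; exact le_rfl
  | cons x t ih =>
    intro cap g tot nxt m h
    simp only [countNextB] at h
    by_cases htot : tot + x > cap
    · rw [if_pos htot] at h
      obtain ⟨v, hv1, hv2, hv3, hv4⟩ := minUpd_spec nxt (tot + x)
      rw [hv1] at h
      obtain ⟨h1, h2, h3⟩ := ih cap (g + 1) x (some v) m h
      have hmv : m ≤ v := h3 v rfl
      constructor
      · rcases h1 with h1 | ⟨hmem, hcap⟩
        · -- m = v
          cases h1
          rcases hv4 with rfl | hv4
          · exact Or.inr ⟨by simp [cmps], htot⟩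
          · exact Or.inl hv4
        · refine Or.inr ⟨?_, hcap⟩
          simp only [cmps, List.mem_cons]
          right; rw [if_neg (by omega)]; exact hmem
      constructor
      · intro s hs hcs
        simp only [cmps, List.mem_cons] at hs
        rcases hs with rfl | hs
        · omega
        · rw [if_neg (by omega)] at hs
          exact h2 s hs hcs
      · intro k hk
        have := hv3 k hk
        omega
    · rw [if_neg htot] at h
      obtain ⟨h1, h2, h3⟩ := ih cap g (tot + x) nxt m h
      refine ⟨?_, ?_, h3⟩
      · rcases h1 with h1 | ⟨hmem, hcap⟩
        · exact Or.inl h1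
        · refine Or.inr ⟨?_, hcap⟩
          simp only [cmps, List.mem_cons]
          right; rw [if_pos (by omega)]; exact hmem
      · intro s hs hcs
        simp only [cmps, List.mem_cons] at hs
        rcases hs with rfl | hs
        · omega
        · rw [if_pos (by omega)] at hs
          exact h2 s hs hcs

-- CONGRUENCE: if no compared sum lies in (p, q], the greedy count agrees at p and q
lemma run_congr (p q : Int) (hpq : p ≤ q) : ∀ (l : List Int) (sp cnt : Int),
    (∀ s ∈ cmps p l sp, s ≤ p ∨ q < s) →
    findStudentA l q cnt sp = findStudentA l p cnt sp := by
  intro l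
  induction l with
  | nil => intro sp cnt _; rfl
  | cons x t ih =>
    intro sp cnt h
    have hv := h (sp + x) (by simp [cmps])
    simp only [findStudentA]
    by_cases hc : sp + x ≤ p
    · rw [if_pos (by omega), if_pos hc]
      apply ih
      intro s hs
      apply h
      simp only [cmps, List.mem_cons]
      right; rw [if_pos hc]; exact hs
    · rw [if_neg (by omega), if_neg hc]
      apply ih
      intro s hs
      apply h
      simp only [cmps, List.mem_cons]
      right; rw [if_neg hc]; exact hs

-- A's loop returns none when no page count in [lo, high) matches
lemma loopA_none (arr : List Int) (student high : Int) :
    ∀ (n : Nat) (lo : Int), (high - lo).toNat = n →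
    (∀ qq, lo ≤ qq → qq < high → findStudentA arr qq 1 0 ≠ student) →
    allocLoopA arr student lo high = none := by
  intro n
  induction n with
  | zero =>
    intro lo hn _
    rw [allocLoopA, dif_neg (by omega)]
  | succ k ih =>
    intro lo hn h
    rw [allocLoopA, dif_pos (by omega)]
    rw [if_neg (h lo le_rfl (by omega))]
    exact ih (lo + 1) (by omega) (fun qq h1 h2 => h qq (by omega) h2)

-- A's loop skips an interval of non-matching page counts
lemma loopA_skip (arr : List Int) (student high : Int) :
    ∀ (n : Nat) (lo r : Int), (r - lo).toNat = n → lo ≤ r →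
    (∀ qq, lo ≤ qq → qq < r → findStudentA arr qq 1 0 ≠ student) →
    allocLoopA arr student lo high = allocLoopA arr student r high := by
  intro n
  induction n with
  | zero =>
    intro lo r hn hle _
    have : lo = r := by omega
    rw [this]
  | succ k ih =>
    intro lo r hn hle h
    have hlt : lo < r := by omega
    by_cases hhi : lo < high
    · rw [allocLoopA, dif_pos hhi, if_neg (h lo le_rfl hlt)]
      exact ih (lo + 1) r (by omega) (by omega) (fun qq h1 h2 => h qq (by omega) h2)
    · rw [allocLoopA, dif_neg hhi, allocLoopA, dif_neg (by omega)]

-- the two loops agree from any common starting page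
lemma loops_eq (arr : List Int) (student high : Int) :
    ∀ (n : Nat) (p : Int), (high - p).toNat ≤ n →
    allocLoopA arr student p high = allocLoopB arr student p high := by
  intro n
  induction n with
  | zero =>
    intro p hn
    rw [allocLoopA, dif_neg (by omega), allocLoopB, dif_neg (by omega)]
  | succ k ih =>
    intro p hn
    by_cases hp : p < high
    · rw [allocLoopB, dif_pos hp]
      have hfst := countNextB_fst arr p 1 0 none
      by_cases hf : findStudentA arr p 1 0 = student
      · rw [allocLoopA, dif_pos hp, if_pos hf]
        simp only [hfst, if_pos hf]
      · simp only [hfst, if_neg hf]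
        cases hnx : (countNextB arr p 1 0 none).2 with
        | none =>
          have hall := countNextB_none arr p 1 0 none hnx
          apply loopA_none arr student high (high - p).toNat p rfl
          intro qq h1 h2
          rw [run_congr p qq h1 arr 0 1 (fun s hs => Or.inl (hall s hs))]
          exact hf
        | some m =>
          obtain ⟨h1, h2, _⟩ := countNextB_some arr p 1 0 none m hnx
          have hpm : p < m := by
            rcases h1 with h1 | ⟨_, h1⟩
            · cases h1
            · exact h1
          have hplateau : ∀ qq, p ≤ qq → qq < m → findStudentA arr qq 1 0 ≠ student := by
            intro qq hq1 hq2
            rw [run_congr p qq hq1 arr 0 1 (fun s hs => by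
              by_cases hsp : s ≤ p
              · exact Or.inl hsp
              · exact Or.inr (by have := h2 s hs (by omega); omega))]
            exact hf
          rw [allocLoopA]
          rw [dif_pos hp, if_neg hf]
          rw [loopA_skip arr student high (m - (p+1)).toNat (p+1) m rfl (by omega)
            (fun qq hq1 hq2 => hplateau qq (by omega) hq2)]
          exact ih m (by omega)
    · rw [allocLoopA, dif_neg hp, allocLoopB, dif_neg hp]

-- ===== VERDICT (by name: the statement is the Claim_ definition above) =====
theorem allocationBook_spec : Claim_equal_allocationBook := by
  intro arr student _ _
  unfold Spec_allocationBook allocationBook allocationBook_alt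
  by_cases hlen : (arr.length : Int) < student
  · rw [if_pos hlen, if_pos hlen]
  · rw [if_neg hlen, if_neg hlen]
    cases hmax : PySem.List.max? arr (fun x => x) with
    | none => rfl
    | some low =>
      exact loops_eq arr student arr.sum (arr.sum - low).toNat low le_rfl
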